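-- pv_equiv track=rewrite | github.com/deep5050/CalendarFusion | CalendarFusion/__init__.py | get_lang_dict
-- ===== SOURCE A (Python) =====
-- def get_lang_dict(lang="en"):
--     dic = {}
--     colnames = ["Week", "Mon", "Tue", "Wed", "Thu", "Fri", "Sat", "Sun"]
--     colnames_ja = ["週", "月", "火", "水", "木", "金", "土", "日"]
--     colnames_tw = ["週", "一", "二", "三", "四", "五", "六", "日"] # Taiwan
--     colnames_hi = ["सप्ताह", "सोम", "मंगल", "बुध", "गुरु", "शुक्र", "शनि", "रवि"]  # Hindi
--     colnames_bn = ["সপ্তাহ", "সোম", "মঙ্গল", "বুধ", "বৃহস্পতি", "শুক্র", "শনি", "রবি"]  # Bengali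
--
--     if lang == "en":
--         for col in colnames:
--             dic[col] = col
--     elif lang == "tw":
--         for col, colja in zip(colnames, colnames_tw):
--             dic[col] = colja
--     elif lang == "ja":
--         for col, colja in zip(colnames, colnames_ja):
--             dic[col] = colja
--     elif lang =="hi":
--         for col, colja in zip(colnames, colnames_hi):
--             dic[col] = colja
--     elif lang == "bn":
--         for col, colja in zip(colnames, colnames_bn):
--             dic[col] = colja
--     else:
--         for col in colnames:
--             dic[col] = col
--     return dic
-- ===== SOURCE B (Python) =====
-- def get_lang_dict(lang="en"):
--     # Transposed (column-major) table: for each English weekday name, its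
--     # translations keyed by language; the dict is built in one comprehension
--     # by a per-column language lookup defaulting to the English name itself.
--     table = {
--         "Week": {"tw": "週", "ja": "週", "hi": "सप्ताह", "bn": "সপ্তাহ"},
--         "Mon":  {"tw": "一", "ja": "月", "hi": "सोम", "bn": "সোম"},
--         "Tue":  {"tw": "二", "ja": "火", "hi": "मंगल", "bn": "মঙ্গল"},
--         "Wed":  {"tw": "三", "ja": "水", "hi": "बुध", "bn": "বুধ"},
--         "Thu":  {"tw": "四", "ja": "木", "hi": "गुरु", "bn": "বৃহস্পতি"},
--         "Fri":  {"tw": "五", "ja": "金", "hi": "शुक्र", "bn": "শুক্র"},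
--         "Sat":  {"tw": "六", "ja": "土", "hi": "शनि", "bn": "শনি"},
--         "Sun":  {"tw": "日", "ja": "日", "hi": "रवि", "bn": "রবি"},
--     }
--     return {col: tr.get(lang, col) for col, tr in table.items()}
-- ===== Notes on version B (the rewrite author's own statement) =====
-- stated objective: alternative
-- what changed: Transposes the data layout: instead of five language-major weekday lists selected by an if/elif cascade and zipped into the dict, B stores one column-major table mapping each English name to its per-language translations and builds the result in a single comprehension with a per-column language lookup defaulting to the English name.
import Mathlib
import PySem

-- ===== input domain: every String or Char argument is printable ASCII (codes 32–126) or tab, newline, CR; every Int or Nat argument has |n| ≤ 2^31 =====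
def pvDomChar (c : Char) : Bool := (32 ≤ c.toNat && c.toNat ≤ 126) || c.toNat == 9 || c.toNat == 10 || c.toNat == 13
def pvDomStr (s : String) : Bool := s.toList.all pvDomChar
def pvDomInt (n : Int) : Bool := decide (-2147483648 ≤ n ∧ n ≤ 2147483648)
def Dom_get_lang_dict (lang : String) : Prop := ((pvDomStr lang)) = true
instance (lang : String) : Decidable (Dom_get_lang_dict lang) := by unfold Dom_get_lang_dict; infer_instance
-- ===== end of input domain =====

-- B transposes A's language-major weekday lists into a column-major per-name translation table
-- built in one comprehension (objective: alternative data layout, same cost).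

-- ===== PORT A =====
def pvColnames : List String := ["Week", "Mon", "Tue", "Wed", "Thu", "Fri", "Sat", "Sun"]
def pvColnamesJa : List String := ["週", "月", "火", "水", "木", "金", "土", "日"]
def pvColnamesTw : List String := ["週", "一", "二", "三", "四", "五", "六", "日"]
def pvColnamesHi : List String := ["सप्ताह", "सोम", "मंगल", "बुध", "गुरु", "शुक्र", "शनि", "रवि"]
def pvColnamesBn : List String := ["সপ্তাহ", "সোম", "মঙ্গল", "বুধ", "বৃহস্পতি", "শুক্র", "শনি", "রবি"]

def get_lang_dict (lang : String) : List (String × String) :=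
  let dic : PySem.Dict String String := PySem.Dict.empty
  if lang == "en" then
    (pvColnames.foldl (fun d col => d.insert col col) dic).items
  else if lang == "tw" then
    ((pvColnames.zip pvColnamesTw).foldl (fun d p => d.insert p.1 p.2) dic).items
  else if lang == "ja" then
    ((pvColnames.zip pvColnamesJa).foldl (fun d p => d.insert p.1 p.2) dic).items
  else if lang == "hi" then
    ((pvColnames.zip pvColnamesHi).foldl (fun d p => d.insert p.1 p.2) dic).items
  else if lang == "bn" then
    ((pvColnames.zip pvColnamesBn).foldl (fun d p => d.insert p.1 p.2) dic).items
  else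
    (pvColnames.foldl (fun d col => d.insert col col) dic).items

-- ===== PORT B =====
-- column-major table: each English name with its per-language translations
def pvTable : List (String × PySem.Dict String String) :=
  [("Week", PySem.Dict.ofList [("tw", "週"), ("ja", "週"), ("hi", "सप्ताह"), ("bn", "সপ্তাহ")]),
   ("Mon",  PySem.Dict.ofList [("tw", "一"), ("ja", "月"), ("hi", "सोम"), ("bn", "সোম")]),
   ("Tue",  PySem.Dict.ofList [("tw", "二"), ("ja", "火"), ("hi", "मंगल"), ("bn", "মঙ্গল")]),
   ("Wed",  PySem.Dict.ofList [("tw", "三"), ("ja", "水"), ("hi", "बुध"), ("bn", "বুধ")]),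
   ("Thu",  PySem.Dict.ofList [("tw", "四"), ("ja", "木"), ("hi", "गुरु"), ("bn", "বৃহস্পতি")]),
   ("Fri",  PySem.Dict.ofList [("tw", "五"), ("ja", "金"), ("hi", "शुक्र"), ("bn", "শুক্র")]),
   ("Sat",  PySem.Dict.ofList [("tw", "六"), ("ja", "土"), ("hi", "शनि"), ("bn", "শনি")]),
   ("Sun",  PySem.Dict.ofList [("tw", "日"), ("ja", "日"), ("hi", "रवि"), ("bn", "রবি")])]

def get_lang_dict_alt (lang : String) : List (String × String) :=
  (PySem.Dict.ofList (pvTable.map (fun p => (p.1, p.2.getD lang p.1)))).items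

-- ===== PRECONDITION & SPEC =====
def Spec_get_lang_dict (lang : String) (out : List (String × String)) : Prop := out = get_lang_dict_alt lang
instance (lang : String) (out : List (String × String)) : Decidable (Spec_get_lang_dict lang out) := by unfold Spec_get_lang_dict; infer_instance

-- ===== CLAIM (what is proved, stated in full; the proofs are below) =====
def Claim_equal_get_lang_dict : Prop := ∀ (lang : String), Dom_get_lang_dict lang → Spec_get_lang_dict lang (get_lang_dict lang)

-- ===== LEMMAS AND PROOFS =====

theorem pvItemsFoldId (l : List String) (h : l.Nodup) :
    (l.foldl (fun d c => d.insert c c) (PySem.Dict.empty : PySem.Dict String String)).items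
      = l.map (fun c => (c, c)) := by
  have := PySem.Dict.items_foldl_insert_fresh (l := l) (k := id) (v := id)
    (d := (PySem.Dict.empty : PySem.Dict String String))
    (by intro a _; simp [PySem.Dict.contains_empty]) (by simpa using h)
  simpa using this

-- ===== VERDICT (by name: the statement is the Claim_ definition above) =====
theorem get_lang_dict_spec : Claim_equal_get_lang_dict := by
  intro lang _
  unfold Spec_get_lang_dict
  by_cases h1 : lang = "en"
  · subst h1; decide
  by_cases h2 : lang = "tw"
  · subst h2; decide
  by_cases h3 : lang = "ja"
  · subst h3; decide
  by_cases h4 : lang = "hi"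
  · subst h4; decide
  by_cases h5 : lang = "bn"
  · subst h5; decide
  · unfold get_lang_dict get_lang_dict_alt pvTable
    simp only [beq_iff_eq, if_neg h1, if_neg h2, if_neg h3, if_neg h4, if_neg h5, List.map]
    rw [pvItemsFoldId pvColnames (by decide)]
    have key : ∀ (l : List (String × String)) (d : PySem.Dict String String) (dflt : String),
        (∀ p ∈ l, lang ≠ p.1) →
        (l.foldl (fun d p => d.insert p.1 p.2) d).getD lang dflt = d.getD lang dflt := by
      intro l
      induction l with
      | nil => intro d dflt _; rfl
      | cons p rest ih =>
          intro d dflt h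
          simp only [List.foldl_cons]
          rw [ih _ _ (fun q hq => h q (List.mem_cons_of_mem _ hq))]
          exact PySem.Dict.getD_insert_of_ne (hne := h p List.mem_cons_self) ..
    have key2 : ∀ (l : List (String × String)) (dflt : String),
        l.map Prod.fst = ["tw", "ja", "hi", "bn"] →
        (PySem.Dict.ofList l).getD lang dflt = dflt := by
      intro l dflt hkeys
      have hne : ∀ p ∈ l, lang ≠ p.1 := by
        intro p hp
        have hk : p.1 ∈ ["tw", "ja", "hi", "bn"] :=
          hkeys ▸ List.mem_map_of_mem (f := Prod.fst) hp
        simp only [List.mem_cons, List.not_mem_nil, or_false] at hk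
        rcases hk with h | h | h | h <;> rw [h] <;> assumption
      rw [show PySem.Dict.ofList l = l.foldl (fun d p => d.insert p.1 p.2) PySem.Dict.empty from rfl,
        key l PySem.Dict.empty dflt hne]
      simp [PySem.Dict.getD_empty]
    rw [key2 _ "Week" rfl, key2 _ "Mon" rfl, key2 _ "Tue" rfl, key2 _ "Wed" rfl,
      key2 _ "Thu" rfl, key2 _ "Fri" rfl, key2 _ "Sat" rfl, key2 _ "Sun" rfl]
    decide
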